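-- pv_equiv track=rewrite | github.com/CorigitPirhub/docking | scripts/visualize_runtime_support.py | largest_train_size
-- ===== SOURCE A (Python) =====
-- def largest_train_size(edges: tuple[tuple[int, int], ...], vehicle_ids: tuple[int, ...]) -> int:
--     parent = {v: None for v in vehicle_ids}
--     child = {v: None for v in vehicle_ids}
--     for p, c in edges:
--         parent[c] = p
--         child[p] = c
--     heads = [v for v in vehicle_ids if parent[v] is None]
--     best = 0
--     for h in heads:
--         n = 1
--         cur = child[h]
--         while cur is not None:
--             n += 1
--             cur = child[cur]
--         best = max(best, n)
--     return best
-- ===== SOURCE B (Python) =====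
-- def largest_train_size(edges: tuple[tuple[int, int], ...], vehicle_ids: tuple[int, ...]) -> int:
--     parent = {v: None for v in vehicle_ids}
--     child = {v: None for v in vehicle_ids}
--     for p, c in edges:
--         parent[c] = p
--         child[p] = c
--     # memoized chain length: depth[v] = 1 + depth[child[v]], computed iteratively
--     memo = {}
--     best = 0
--     for v in vehicle_ids:
--         if parent[v] is not None:
--             continue
--         path = []
--         cur = v
--         while cur is not None and cur not in memo:
--             path.append(cur)
--             cur = child[cur]
--         d = 0 if cur is None else memo[cur]
--         for u in reversed(path):
--             d += 1
--             memo[u] = d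
--         best = max(best, d)
--     return best
-- ===== Notes on version B (the rewrite author's own statement) =====
-- stated objective: alternative
-- what changed: A walks every head's chain from scratch with a while-loop; B computes each vehicle's chain depth once via an iterative memoized depth pass (collect uncached prefix, write depths back), so shared chain suffixes are never re-traversed.
import Mathlib
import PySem

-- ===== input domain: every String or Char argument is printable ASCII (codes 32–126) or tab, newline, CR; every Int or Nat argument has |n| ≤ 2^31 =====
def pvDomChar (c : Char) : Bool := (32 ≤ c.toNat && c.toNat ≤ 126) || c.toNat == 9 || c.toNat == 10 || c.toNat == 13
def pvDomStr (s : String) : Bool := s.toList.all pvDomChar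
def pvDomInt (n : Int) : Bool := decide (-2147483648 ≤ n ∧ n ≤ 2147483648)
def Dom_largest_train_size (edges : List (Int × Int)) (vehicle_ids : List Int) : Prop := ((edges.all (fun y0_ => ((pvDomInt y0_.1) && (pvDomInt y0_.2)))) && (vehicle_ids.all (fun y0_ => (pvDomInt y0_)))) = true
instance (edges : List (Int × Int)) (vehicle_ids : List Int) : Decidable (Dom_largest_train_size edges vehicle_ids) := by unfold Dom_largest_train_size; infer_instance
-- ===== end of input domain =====

-- B replaces A's per-head while-loop that re-walks every chain from scratch by a single
-- memoized pass (each vehicle's chain depth is computed once and cached in a dict).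

-- ===== PORT A =====
-- shared map building (both Pythons build parent/child with identical code)
def pvBuildMaps (edges : List (Int × Int)) (vehicle_ids : List Int) :
    PySem.Dict Int (Option Int) × PySem.Dict Int (Option Int) :=
  let parent := vehicle_ids.foldl (fun d v => d.insert v none) PySem.Dict.empty
  let child := vehicle_ids.foldl (fun d v => d.insert v none) PySem.Dict.empty
  edges.foldl (fun pc e => (pc.1.insert e.2 (some e.1), pc.2.insert e.1 (some e.2)))
    (parent, child)

-- A's `while cur is not None: n += 1; cur = child[cur]` (fuel-bounded; a missing key is
-- Python's KeyError and fuel exhaustion is Python's divergence — both excluded by Pre_,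
-- the values returned there are junk)
def pvWalkA (child : PySem.Dict Int (Option Int)) (fuel : Nat) (cur : Option Int) (n : Int) : Int :=
  match cur with
  | none => n
  | some c =>
    match fuel with
    | 0 => n
    | f + 1 =>
      match child.get? c with
      | none => n + 1
      | some nxt => pvWalkA child f nxt (n + 1)

-- body of A's `for h in heads` loop
def pvBestStepA (child : PySem.Dict Int (Option Int)) (fuel : Nat) (best : Int) (h : Int) : Int :=
  match child.get? h with
  | none => best          -- KeyError (unreachable: every head is a key of child)
  | some cur0 => max best (pvWalkA child fuel cur0 1)

def largest_train_size (edges : List (Int × Int)) (vehicle_ids : List Int) : Int :=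
  let pc := pvBuildMaps edges vehicle_ids
  let heads := vehicle_ids.filter (fun v => (pc.1.getD v none).isNone)
  heads.foldl (pvBestStepA pc.2 (pc.2.keys.length + 1)) 0

-- ===== PORT B =====
-- B's `while cur is not None and cur not in memo: path.append(cur); cur = child[cur]`
def pvCollect (child : PySem.Dict Int (Option Int)) (memo : PySem.Dict Int Int) :
    Nat → Option Int → List Int → List Int × Option Int
  | 0, v, path => (path, v)            -- fuel out = Python's divergence (outside Pre_)
  | f + 1, v, path =>
    match v with
    | none => (path, none)
    | some u =>
      if memo.contains u then (path, some u)
      else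
        match child.get? u with
        | none => (path ++ [u], none)  -- KeyError (outside Pre_)
        | some nxt => pvCollect child memo f nxt (path ++ [u])

-- B's depth computation for one head: collect the uncached chain prefix, then write the
-- depths back into the memo (`for u in reversed(path): d += 1; memo[u] = d`)
def pvDepthB (child : PySem.Dict Int (Option Int)) (memo : PySem.Dict Int Int)
    (fuel : Nat) (v : Int) : Int × PySem.Dict Int Int :=
  let pcur := pvCollect child memo fuel (some v) []
  let d0 : Int := match pcur.2 with | none => 0 | some w => memo.getD w 0
  pcur.1.reverse.foldl (fun dm u => (dm.1 + 1, dm.2.insert u (dm.1 + 1))) (d0, memo)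

-- body of B's `for v in vehicle_ids` loop (state = (best, memo))
def pvBestStepB (parent child : PySem.Dict Int (Option Int)) (fuel : Nat)
    (st : Int × PySem.Dict Int Int) (v : Int) : Int × PySem.Dict Int Int :=
  if (parent.getD v none).isNone then
    let dm := pvDepthB child st.2 fuel v
    (max st.1 dm.1, dm.2)
  else st

def largest_train_size_alt (edges : List (Int × Int)) (vehicle_ids : List Int) : Int :=
  let pc := pvBuildMaps edges vehicle_ids
  (vehicle_ids.foldl (pvBestStepB pc.1 pc.2 (pc.2.keys.length + 1))
    (0, PySem.Dict.empty)).1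

-- ===== PRECONDITION & SPEC =====
-- one step of following a child link: none = KeyError, some none = chain finished
def pvStep (child : PySem.Dict Int (Option Int)) : Option (Option Int) → Option (Option Int)
  | none => none
  | some none => some none
  | some (some u) => child.get? u

-- Pre_ excludes exactly the inputs on which Python A does not return: a KeyError (some
-- head's chain reaches an id that is not a key of `child`) or divergence (some head's
-- chain is cyclic): from every head, following child links must reach None (it then does
-- so within |child keys| steps, since a terminating chain visits distinct keys).
def Pre_largest_train_size (edges : List (Int × Int)) (vehicle_ids : List Int) : Prop :=
  ∀ v ∈ vehicle_ids,
    (((pvBuildMaps edges vehicle_ids).1.getD v none).isNone = true) →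
    ∃ k ∈ List.range ((pvBuildMaps edges vehicle_ids).2.keys.length + 1),
      (pvStep (pvBuildMaps edges vehicle_ids).2)^[k] (some (some v)) = some none

instance (edges : List (Int × Int)) (vehicle_ids : List Int) : Decidable (Pre_largest_train_size edges vehicle_ids) := by
  unfold Pre_largest_train_size; infer_instance

def pvWitness_largest_train_size : (List (Int × Int)) × List Int := ([(1, 2)], [1, 2])

def Spec_largest_train_size (edges : List (Int × Int)) (vehicle_ids : List Int) (out : Int) : Prop := out = largest_train_size_alt edges vehicle_ids
instance (edges : List (Int × Int)) (vehicle_ids : List Int) (out : Int) : Decidable (Spec_largest_train_size edges vehicle_ids out) := by unfold Spec_largest_train_size; infer_instance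

-- ===== CLAIM (what is proved, stated in full; the proofs are below) =====
def Claim_equal_largest_train_size : Prop := ∀ (edges : List (Int × Int)) (vehicle_ids : List Int), Dom_largest_train_size edges vehicle_ids → Pre_largest_train_size edges vehicle_ids → Spec_largest_train_size edges vehicle_ids (largest_train_size edges vehicle_ids)

-- ===== LEMMAS AND PROOFS =====

-- the (partial) chain depth: pvDepth child f u = some d iff following child links from u
-- reaches None in d steps, all lookups succeeding, within fuel f
def pvDepth (child : PySem.Dict Int (Option Int)) : Nat → Int → Option Int
  | 0, _ => none
  | f + 1, u =>
    match child.get? u with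
    | none => none
    | some none => some 1
    | some (some c) => (pvDepth child f c).map (· + 1)

-- every memo entry is a true chain depth
def pvInv (child : PySem.Dict Int (Option Int)) (memo : PySem.Dict Int Int) : Prop :=
  ∀ w dw, memo.get? w = some dw → ∃ g, pvDepth child g w = some dw

theorem pvDepth_succ_none {child : PySem.Dict Int (Option Int)} {u : Int} (f : Nat)
    (hc : child.get? u = none) : pvDepth child (f + 1) u = none := by
  simp [pvDepth, hc]

theorem pvDepth_succ_fin {child : PySem.Dict Int (Option Int)} {u : Int} (f : Nat)
    (hc : child.get? u = some none) : pvDepth child (f + 1) u = some 1 := by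
  simp [pvDepth, hc]

theorem pvDepth_succ_step {child : PySem.Dict Int (Option Int)} {u c : Int} (f : Nat)
    (hc : child.get? u = some (some c)) :
    pvDepth child (f + 1) u = (pvDepth child f c).map (· + 1) := by
  simp [pvDepth, hc]

theorem pvDepth_mono (child : PySem.Dict Int (Option Int)) :
    ∀ f g u d, pvDepth child f u = some d → f ≤ g → pvDepth child g u = some d := by
  intro f
  induction f with
  | zero => intro g u d h _; simp [pvDepth] at h
  | succ f ih =>
    intro g u d h hle
    obtain ⟨g', rfl⟩ : ∃ g', g = g' + 1 := ⟨g - 1, by omega⟩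
    cases hc : child.get? u with
    | none => rw [pvDepth_succ_none f hc] at h; exact absurd h (by simp)
    | some o =>
      cases o with
      | none => rw [pvDepth_succ_fin f hc] at h; rw [pvDepth_succ_fin g' hc]; exact h
      | some c =>
        rw [pvDepth_succ_step f hc] at h
        rw [pvDepth_succ_step g' hc]
        cases hd : pvDepth child f c with
        | none => rw [hd] at h; exact absurd h (by simp)
        | some d' => rw [ih g' c d' hd (by omega)]; rw [hd] at h; exact h

theorem pvDepth_unique (child : PySem.Dict Int (Option Int)) (f g : Nat) (u : Int) (d d' : Int)
    (h1 : pvDepth child f u = some d) (h2 : pvDepth child g u = some d') : d = d' := by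
  have h1' := pvDepth_mono child f (max f g) u d h1 (le_max_left _ _)
  have h2' := pvDepth_mono child g (max f g) u d' h2 (le_max_right _ _)
  rw [h1'] at h2'
  exact Option.some.injEq .. ▸ (by simpa using h2')

theorem pvStep_iter (child : PySem.Dict Int (Option Int)) :
    ∀ k u, (pvStep child)^[k] (some (some u)) = some none →
      ∃ d, pvDepth child k u = some d := by
  intro k
  induction k with
  | zero => intro u h; simp at h
  | succ k ih =>
    intro u h
    rw [Function.iterate_succ_apply] at h
    have hstep : pvStep child (some (some u)) = child.get? u := rfl
    rw [hstep] at h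
    cases hc : child.get? u with
    | none =>
      rw [hc, Function.iterate_fixed (by rfl : pvStep child none = none)] at h
      exact absurd h (by simp)
    | some o =>
      cases o with
      | none => exact ⟨1, pvDepth_succ_fin k hc⟩
      | some c =>
        rw [hc] at h
        obtain ⟨d, hd⟩ := ih c h
        exact ⟨d + 1, by rw [pvDepth_succ_step k hc, hd]; rfl⟩

theorem pvWalkA_eq (child : PySem.Dict Int (Option Int)) :
    ∀ f u d F n, pvDepth child f u = some d → f ≤ F →
      pvWalkA child F (some u) n = n + d := by
  intro f
  induction f with
  | zero => intro u d F n h _; simp [pvDepth] at h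
  | succ f ih =>
    intro u d F n h hle
    obtain ⟨F', rfl⟩ : ∃ F', F = F' + 1 := ⟨F - 1, by omega⟩
    cases hc : child.get? u with
    | none => rw [pvDepth_succ_none f hc] at h; exact absurd h (by simp)
    | some o =>
      cases o with
      | none =>
        rw [pvDepth_succ_fin f hc] at h
        have : d = 1 := by simpa using h.symm
        simp [pvWalkA, hc, this]
      | some c =>
        rw [pvDepth_succ_step f hc] at h
        obtain ⟨d', hd', rfl⟩ : ∃ d', pvDepth child f c = some d' ∧ d = d' + 1 := by
          cases hx : pvDepth child f c with
          | none => rw [hx] at h; exact absurd h (by simp)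
          | some y => rw [hx] at h; exact ⟨y, rfl, by simpa using h.symm⟩
        simp only [pvWalkA, hc]
        rw [ih c d' F' (n + 1) hd' (by omega)]
        ring

theorem pvCollect_none (child : PySem.Dict Int (Option Int)) (memo : PySem.Dict Int Int) :
    ∀ F path, pvCollect child memo F none path = (path, none) := by
  intro F path; cases F <;> rfl

theorem pvCollect_append (child : PySem.Dict Int (Option Int)) (memo : PySem.Dict Int Int) :
    ∀ F v path, pvCollect child memo F v path =
      (path ++ (pvCollect child memo F v []).1, (pvCollect child memo F v []).2) := by
  intro F
  induction F with
  | zero => intro v path; simp [pvCollect]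
  | succ F ih =>
    intro v path
    cases v with
    | none => simp [pvCollect]
    | some u =>
      by_cases hm : memo.contains u
      · simp [pvCollect, hm]
      · simp only [pvCollect, hm, Bool.false_eq_true, ↓reduceIte]
        cases hc : child.get? u with
        | none => simp
        | some nxt =>
          show pvCollect child memo F nxt (path ++ [u]) =
            (path ++ (pvCollect child memo F nxt ([] ++ [u])).1,
             (pvCollect child memo F nxt ([] ++ [u])).2)
          rw [ih nxt (path ++ [u]), ih nxt ([] ++ [u])]
          simp

theorem pvDepthB_eq (child : PySem.Dict Int (Option Int)) :
    ∀ f memo u d F, pvInv child memo → pvDepth child f u = some d → f ≤ F →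
      (pvDepthB child memo F u).1 = d ∧ pvInv child (pvDepthB child memo F u).2 := by
  intro f
  induction f with
  | zero => intro memo u d F _ h _; simp [pvDepth] at h
  | succ f ih =>
    intro memo u d F hinv h hle
    obtain ⟨F', rfl⟩ : ∃ F', F = F' + 1 := ⟨F - 1, by omega⟩
    by_cases hm : memo.contains u
    · -- cached: collect returns immediately, d0 = memo[u] = d
      obtain ⟨dw, hdw⟩ : ∃ dw, memo.get? u = some dw := by
        have := PySem.Dict.contains_eq_isSome_get? (d := memo) (k := u)
        rw [hm] at this
        cases hx : memo.get? u with
        | none => rw [hx] at this; simp at this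
        | some y => exact ⟨y, rfl⟩
      obtain ⟨g, hg⟩ := hinv u dw hdw
      have hdd : dw = d := pvDepth_unique child g (f + 1) u dw d hg h
      have hcol : pvCollect child memo (F' + 1) (some u) [] = ([], some u) := by
        simp [pvCollect, hm]
      constructor
      · simp [pvDepthB, hcol, PySem.Dict.getD_eq_get?_getD, hdw, hdd]
      · simpa [pvDepthB, hcol] using hinv
    · cases hc : child.get? u with
      | none => rw [pvDepth_succ_none f hc] at h; exact absurd h (by simp)
      | some o =>
        cases o with
        | none =>
          -- chain ends right after u: d = 1, memo gains u ↦ 1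
          rw [pvDepth_succ_fin f hc] at h
          have hd1 : d = 1 := by simpa using h.symm
          have hcol : pvCollect child memo (F' + 1) (some u) [] = ([u], none) := by
            simp [pvCollect, hm, hc, pvCollect_none]
          constructor
          · simp [pvDepthB, hcol, hd1]
          · intro w dw hw
            simp only [pvDepthB, hcol] at hw
            simp only [List.reverse_cons, List.reverse_nil, List.nil_append,
              List.foldl_cons, List.foldl_nil] at hw
            rw [PySem.Dict.get?_insert] at hw
            by_cases hwu : w = u
            · refine ⟨f + 1, ?_⟩
              rw [if_pos hwu] at hw
              have : dw = 1 := by simpa using hw.symm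
              rw [hwu, this]
              exact pvDepth_succ_fin f hc
            · rw [if_neg hwu] at hw
              exact hinv w dw hw
        | some c =>
          rw [pvDepth_succ_step f hc] at h
          obtain ⟨d', hd', rfl⟩ : ∃ d', pvDepth child f c = some d' ∧ d = d' + 1 := by
            cases hx : pvDepth child f c with
            | none => rw [hx] at h; exact absurd h (by simp)
            | some y => rw [hx] at h; exact ⟨y, rfl, by simpa using h.symm⟩
          have hdu : pvDepth child (f + 1) u = some (d' + 1) := by
            rw [pvDepth_succ_step f hc, hd']; rfl
          obtain ⟨ih1, ih2⟩ := ih memo c d' F' hinv hd' (by omega)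
          have hcol : pvCollect child memo (F' + 1) (some u) [] =
              ([u] ++ (pvCollect child memo F' (some c) []).1,
               (pvCollect child memo F' (some c) []).2) := by
            simp only [pvCollect, hm, Bool.false_eq_true, ↓reduceIte, hc]
            exact pvCollect_append child memo F' (some c) [u]
          -- the writeback over [u] ++ Q is the writeback over Q followed by one step at u
          have hsplit : ∀ (Q : List Int) (init : Int × PySem.Dict Int Int),
              (([u] ++ Q).reverse.foldl
                (fun dm x => (dm.1 + 1, dm.2.insert x (dm.1 + 1))) init) =
              ((Q.reverse.foldl (fun dm x => (dm.1 + 1, dm.2.insert x (dm.1 + 1))) init).1 + 1,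
               (Q.reverse.foldl (fun dm x => (dm.1 + 1, dm.2.insert x (dm.1 + 1))) init).2.insert u
                 ((Q.reverse.foldl (fun dm x => (dm.1 + 1, dm.2.insert x (dm.1 + 1))) init).1 + 1)) := by
            intro Q init
            simp [List.foldl_append]
          constructor
          · simp only [pvDepthB, hcol]
            rw [hsplit]
            simp only [pvDepthB] at ih1
            rw [ih1]
          · intro w dw hw
            simp only [pvDepthB, hcol] at hw
            rw [hsplit] at hw
            rw [PySem.Dict.get?_insert] at hw
            by_cases hwu : w = u
            · rw [if_pos hwu] at hw
              simp only [pvDepthB] at ih1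
              rw [ih1] at hw
              refine ⟨f + 1, ?_⟩
              rw [hwu]
              have : dw = d' + 1 := by simpa using hw.symm
              rw [this]; exact hdu
            · rw [if_neg hwu] at hw
              simp only [pvDepthB] at ih2
              exact ih2 w dw hw

theorem pvFold_eq (parent child : PySem.Dict Int (Option Int)) (K : Nat) :
    ∀ (l : List Int) (best : Int) (memo : PySem.Dict Int Int),
      pvInv child memo →
      (∀ v ∈ l, (parent.getD v none).isNone = true →
        ∃ k, k ≤ K ∧ ∃ d, pvDepth child k v = some d) →
      (l.filter (fun v => (parent.getD v none).isNone)).foldl (pvBestStepA child (K + 1)) best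
        = (l.foldl (pvBestStepB parent child (K + 1)) (best, memo)).1 := by
  intro l
  induction l with
  | nil => intro best memo _ _; rfl
  | cons v l ih =>
    intro best memo hinv H
    by_cases hv : (parent.getD v none).isNone = true
    · obtain ⟨k, hk, d, hd⟩ := H v (List.mem_cons_self) hv
      -- per-head value of A is d
      have hA : pvBestStepA child (K + 1) best v = max best d := by
        obtain ⟨k', rfl⟩ : ∃ k', k = k' + 1 := by
          cases k with
          | zero => simp [pvDepth] at hd
          | succ k' => exact ⟨k', rfl⟩
        cases hc : child.get? v with
        | none => rw [pvDepth_succ_none k' hc] at hd; exact absurd hd (by simp)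
        | some o =>
          cases o with
          | none =>
            rw [pvDepth_succ_fin k' hc] at hd
            have : d = 1 := by simpa using hd.symm
            simp [pvBestStepA, hc, pvWalkA, this]
          | some c =>
            rw [pvDepth_succ_step k' hc] at hd
            obtain ⟨d', hd', rfl⟩ : ∃ d', pvDepth child k' c = some d' ∧ d = d' + 1 := by
              cases hx : pvDepth child k' c with
              | none => rw [hx] at hd; exact absurd hd (by simp)
              | some y => rw [hx] at hd; exact ⟨y, rfl, by simpa using hd.symm⟩
            have := pvWalkA_eq child k' c d' (K + 1) 1 hd' (by omega)
            simp only [pvBestStepA, hc, this]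
            congr 1
            omega
      -- per-head value of B is d, and the memo stays sound
      obtain ⟨hB1, hB2⟩ := pvDepthB_eq child (k) memo v d (K + 1) hinv hd (by omega)
      have hstepB : pvBestStepB parent child (K + 1) (best, memo) v =
          (max best d, (pvDepthB child memo (K + 1) v).2) := by
        simp [pvBestStepB, hv, hB1]
      simp only [List.filter_cons, hv, ↓reduceIte, List.foldl_cons]
      rw [hA, hstepB]
      exact ih (max best d) _ hB2 (fun w hw hhw => H w (List.mem_cons_of_mem v hw) hhw)
    · rw [Bool.not_eq_true] at hv
      simp only [List.filter_cons, hv, Bool.false_eq_true, ↓reduceIte, List.foldl_cons]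
      have : pvBestStepB parent child (K + 1) (best, memo) v = (best, memo) := by
        simp [pvBestStepB, hv]
      rw [this]
      exact ih best memo hinv (fun w hw hhw => H w (List.mem_cons_of_mem v hw) hhw)

-- ===== VERDICT (by name: the statement is the Claim_ definition above) =====
theorem largest_train_size_spec : Claim_equal_largest_train_size := by
  intro edges vehicle_ids _ hpre
  unfold Spec_largest_train_size
  unfold largest_train_size largest_train_size_alt
  apply pvFold_eq
  · intro w dw hw
    rw [PySem.Dict.get?_empty] at hw
    exact absurd hw (by simp)
  · intro v hv hhead
    obtain ⟨k, hkmem, hiter⟩ := hpre v hv hhead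
    obtain ⟨d, hd⟩ := pvStep_iter _ k v hiter
    exact ⟨k, by simpa using List.mem_range.mp hkmem, d, hd⟩
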